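-- pv_equiv track=rewrite | github.com/arinamarina89/a.r.batyrova_pish | lb2/main3.py | sum_equal_product
-- ===== SOURCE A (Python) =====
-- def sum_equal_product(n):
--     n = abs(n)  # если число отрицательное
--     s = 0
--     p = 1
--     for digit in str(n):
--         s += int(digit)
--         p *= int(digit)
--     return s == p
-- ===== SOURCE B (Python) =====
-- def sum_equal_product(n):
--     def sp(m):
--         # (digit sum, digit product) of m >= 0, by recursion on the digits
--         if m < 10:
--             return (m, m)
--         s, p = sp(m // 10)
--         d = m % 10
--         return (s + d, p * d)
--     s, p = sp(abs(n))
--     return s == p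
-- ===== Notes on version B (the rewrite author's own statement) =====
-- stated objective: alternative
-- what changed: B replaces A's iterative single pass over the characters of str(n) with a recursive helper on the number itself whose base case is a single-digit value returned as (m, m), so the (sum, product) pair is built by structural recursion on the digits rather than a loop over a string, with no zero special-case.
import Mathlib
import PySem

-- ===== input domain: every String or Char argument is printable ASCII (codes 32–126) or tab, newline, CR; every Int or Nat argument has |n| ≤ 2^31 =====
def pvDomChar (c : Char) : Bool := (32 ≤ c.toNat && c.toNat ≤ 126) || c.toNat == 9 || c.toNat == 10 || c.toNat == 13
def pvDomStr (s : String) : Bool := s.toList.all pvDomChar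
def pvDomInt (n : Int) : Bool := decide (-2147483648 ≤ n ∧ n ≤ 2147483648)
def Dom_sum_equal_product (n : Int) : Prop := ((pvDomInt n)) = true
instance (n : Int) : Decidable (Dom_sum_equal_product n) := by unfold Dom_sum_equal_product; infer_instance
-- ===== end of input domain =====

-- B builds the (digit sum, digit product) pair by recursion on the number with base case m < 10;
-- alternative decomposition (recursive vs A's loop over str(n)), same cost.

-- ===== PORT A =====
-- int(digit): digit is one char of str(abs(n)), always '0'-'9', so Python's int() never raises;
-- ported exactly as PySem.Int.ofChars? [c] with a default never reached.
def sum_equal_product (n : Int) : Bool :=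
  -- n = abs(n); s = 0; p = 1; for digit in str(n): s += int(digit); p *= int(digit)
  let sp : Int × Int :=
    (PySem.Int.toStr |n|).toList.foldl
      (fun sp c =>
        (sp.1 + (PySem.Int.ofChars? [c]).getD 0,
         sp.2 * (PySem.Int.ofChars? [c]).getD 0))
      (0, 1)
  decide (sp.1 = sp.2)

-- ===== PORT B =====
-- def sp(m): if m < 10: return (m, m); s, p = sp(m // 10); d = m % 10; return (s + d, p * d)
def spB (m : Nat) : Int × Int :=
  if m < 10 then ((m : Int), (m : Int))
  else
    let r := spB (m / 10)
    (r.1 + ((m % 10 : Nat) : Int), r.2 * ((m % 10 : Nat) : Int))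
decreasing_by exact Nat.div_lt_self (by omega) (by norm_num)

def sum_equal_product_alt (n : Int) : Bool :=
  let t := spB n.natAbs
  decide (t.1 = t.2)

-- ===== PRECONDITION & SPEC =====
def Spec_sum_equal_product (n : Int) (out : Bool) : Prop := out = sum_equal_product_alt n
instance (n : Int) (out : Bool) : Decidable (Spec_sum_equal_product n out) := by unfold Spec_sum_equal_product; infer_instance

-- ===== CLAIM (what is proved, stated in full; the proofs are below) =====
def Claim_equal_sum_equal_product : Prop := ∀ (n : Int), Dom_sum_equal_product n → Spec_sum_equal_product n (sum_equal_product n)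

-- ===== LEMMAS AND PROOFS =====

-- the digit value A's fold adds/multiplies, for an actual digit character
theorem ofChars_digitChar (d : Nat) (hd : d < 10) :
    (PySem.Int.ofChars? [Nat.digitChar d]).getD 0 = (d : Int) := by
  interval_cases d <;> decide

-- Nat.toDigitsCore characterised by Nat.digits (enough fuel, positive input)
theorem toDigitsCore_eq (f : Nat) : ∀ (m : Nat) (acc : List Char), 0 < m → m < f →
    Nat.toDigitsCore 10 f m acc = ((Nat.digits 10 m).map Nat.digitChar).reverse ++ acc := by
  induction f with
  | zero => intro m acc h1 h2; omega
  | succ f ih =>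
    intro m acc h1 h2
    rw [Nat.toDigitsCore]
    by_cases h : m / 10 = 0
    · simp only [h, if_true]
      rw [Nat.digits_def' (by norm_num : 1 < 10) h1, h]
      simp
    · simp only [h, if_false]
      have hlt : m / 10 < f := by
        have := Nat.div_lt_self h1 (by norm_num : 1 < 10); omega
      rw [ih (m / 10) _ (Nat.pos_of_ne_zero h) hlt]
      rw [Nat.digits_def' (by norm_num : 1 < 10) h1]
      simp

theorem toDigits_eq_digits (m : Nat) (h : 0 < m) :
    Nat.toDigits 10 m = ((Nat.digits 10 m).map Nat.digitChar).reverse := by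
  rw [Nat.toDigits]
  simpa using toDigitsCore_eq (m + 1) m [] h (Nat.lt_succ_self m)

-- A's fold over a list of digit characters computes (s + Σ, p * Π)
theorem foldl_digit_chars (l : List Nat) (hl : ∀ d ∈ l, d < 10) :
    ∀ (s p : Int),
    (l.map Nat.digitChar).foldl
      (fun sp c =>
        (sp.1 + (PySem.Int.ofChars? [c]).getD 0,
         sp.2 * (PySem.Int.ofChars? [c]).getD 0)) (s, p)
    = (s + ((l.map (Int.ofNat)).sum), p * ((l.map (Int.ofNat)).prod)) := by
  induction l with
  | nil => intro s p; simp
  | cons d t ih =>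
    intro s p
    have hd : d < 10 := hl d (List.mem_cons_self ..)
    simp only [List.map_cons, List.foldl_cons, ofChars_digitChar d hd]
    rw [ih (fun x hx => hl x (List.mem_cons_of_mem _ hx))]
    simp [List.sum_cons, List.prod_cons]
    constructor
    · ring
    · ring

-- order of the digits does not matter: sum/prod over a reversed list
theorem foldl_digit_chars_rev (l : List Nat) (hl : ∀ d ∈ l, d < 10) (s p : Int) :
    ((l.map Nat.digitChar).reverse).foldl
      (fun sp c =>
        (sp.1 + (PySem.Int.ofChars? [c]).getD 0,
         sp.2 * (PySem.Int.ofChars? [c]).getD 0)) (s, p)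
    = (s + ((l.map (Int.ofNat)).sum), p * ((l.map (Int.ofNat)).prod)) := by
  rw [← List.map_reverse]
  rw [foldl_digit_chars l.reverse (fun d hd => hl d (List.mem_reverse.mp hd))]
  simp

-- B's recursion computes the same pair, via the Nat.digits recursion
theorem spB_eq (m : Nat) (hm : 0 < m) :
    spB m = ((((Nat.digits 10 m).map (Int.ofNat)).sum),
             (((Nat.digits 10 m).map (Int.ofNat)).prod)) := by
  induction m using Nat.strong_induction_on with
  | _ m ih =>
    rw [spB, Nat.digits_def' (by norm_num : 1 < 10) hm]
    by_cases h : m < 10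
    · have h10 : m / 10 = 0 := Nat.div_eq_of_lt h
      have hmod : m % 10 = m := Nat.mod_eq_of_lt h
      simp [h, h10, hmod]
    · simp only [h, if_false]
      rw [ih (m / 10) (Nat.div_lt_self hm (by norm_num))
           (Nat.pos_of_ne_zero (by omega))]
      simp [List.sum_cons, List.prod_cons]
      exact ⟨add_comm _ _, mul_comm _ _⟩

-- the char list A iterates over, for nonnegative input
theorem toStr_toList_natAbs (n : Int) :
    (PySem.Int.toStr |n|).toList = Nat.toDigits 10 n.natAbs := by
  rw [PySem.Int.toList_toStr, PySem.Int.toChars]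
  rw [if_neg (not_lt.mpr (abs_nonneg n))]
  congr 1
  rw [Int.abs_eq_natAbs, Int.toNat_natCast]

-- ===== VERDICT (by name: the statement is the Claim_ definition above) =====
theorem sum_equal_product_spec : Claim_equal_sum_equal_product := by
  intro n _
  unfold Spec_sum_equal_product sum_equal_product sum_equal_product_alt
  rw [toStr_toList_natAbs]
  by_cases h : n.natAbs = 0
  · rw [h, spB]; decide
  · have hpos : 0 < n.natAbs := Nat.pos_of_ne_zero h
    rw [toDigits_eq_digits _ hpos,
        foldl_digit_chars_rev _ (fun d hd => Nat.digits_lt_base (by norm_num) hd) 0 1,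
        spB_eq _ hpos]
    simp
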